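-- pv_equiv track=rewrite | github.com/tamnil/sketches | javascript/saltitante/saltitante.py | is_jumping
-- ===== SOURCE A (Python) =====
-- def is_jumping(number):
--
--     number_text = str(number)
--     have_greater = False
--     have_less = False
--     jumping_digits = 0
--
--     for idx in range(len(number_text)-1):
--         relative_index = int(number_text[idx+1]) - int(number_text[idx])
--         if relative_index > 0 :
--             have_greater = True
--         if relative_index < 0:
--             have_less = True
--
--         if have_greater == True and have_less == True:
--             return True
--
--     return False
-- ===== SOURCE B (Python) =====
-- def is_jumping(number):
--     ds = [int(c) for c in str(number)]
--     return ds != sorted(ds) and ds != sorted(ds, reverse=True)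
-- ===== Notes on version B (the rewrite author's own statement) =====
-- stated objective: alternative
-- what changed: B never forms digit differences: it tests monotonicity by comparing the digit list with its ascending and descending sorts (jumping up-and-down iff the list equals neither), replacing A's fused difference/flag loop with early return.
import Mathlib
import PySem

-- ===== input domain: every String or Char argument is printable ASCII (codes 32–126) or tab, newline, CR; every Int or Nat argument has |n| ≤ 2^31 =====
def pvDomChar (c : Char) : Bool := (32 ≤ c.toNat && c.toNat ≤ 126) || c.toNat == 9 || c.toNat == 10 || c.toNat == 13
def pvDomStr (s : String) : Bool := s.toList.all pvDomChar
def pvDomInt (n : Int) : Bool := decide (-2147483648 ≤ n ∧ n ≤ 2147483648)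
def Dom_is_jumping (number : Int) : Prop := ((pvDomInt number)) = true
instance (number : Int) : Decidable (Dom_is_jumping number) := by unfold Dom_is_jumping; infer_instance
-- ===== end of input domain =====

-- B drops A's difference/flag loop entirely: it tests monotonicity of the digit list by
-- comparing it with its ascending and descending sorts (alternative algorithm; same result).

-- int(ch) for a single digit character; exact there (Pre_ keeps number ≥ 0, so
-- every character of str(number) is a digit and Python's int() never raises).
def pvDigit (c : Char) : Int := (c.toNat : Int) - 48

-- ===== PORT A =====
-- A's for-loop over range(len-1) with the two flags and the early return.
-- s[idx] is in range for every idx the range produces, so the ' ' default is never used.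
def isJumpingGo (s : List Char) : List Int → Bool → Bool → Bool
  | [], _, _ => false
  | idx :: rest, have_greater, have_less =>
    let relative_index :=
      pvDigit (PySem.List.pyGetD s (idx + 1) ' ') - pvDigit (PySem.List.pyGetD s idx ' ')
    let have_greater := have_greater || decide (relative_index > 0)
    let have_less := have_less || decide (relative_index < 0)
    if have_greater && have_less then true
    else isJumpingGo s rest have_greater have_less

def is_jumping (number : Int) : Bool :=
  let number_text := (PySem.Int.toStr number).toList
  isJumpingGo number_text (PySem.List.pyRange 0 ((number_text.length : Int) - 1) 1) false false

-- ===== PORT B =====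
def is_jumping_alt (number : Int) : Bool :=
  let ds := (PySem.Int.toStr number).toList.map pvDigit
  (ds != PySem.List.sorted ds (fun x => x) false) && (ds != PySem.List.sorted ds (fun x => x) true)

-- ===== PRECONDITION & SPEC =====
-- Pre_ excludes negative numbers: there str(number) starts with '-' and both A and B raise ValueError at int('-').
def Pre_is_jumping (number : Int) : Prop := 0 ≤ number
instance (number : Int) : Decidable (Pre_is_jumping number) := by unfold Pre_is_jumping; infer_instance

def pvWitness_is_jumping : Int := 132

def Spec_is_jumping (number : Int) (out : Bool) : Prop := out = is_jumping_alt number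
instance (number : Int) (out : Bool) : Decidable (Spec_is_jumping number out) := by unfold Spec_is_jumping; infer_instance

-- ===== CLAIM (what is proved, stated in full; the proofs are below) =====
def Claim_equal_is_jumping : Prop := ∀ (number : Int), Dom_is_jumping number → Pre_is_jumping number → Spec_is_jumping number (is_jumping number)

-- ===== LEMMAS AND PROOFS =====

-- A's flag loop over any index list l equals "some diff > 0 AND some diff < 0" (seeded by the flags),
-- provided the flags are not already both true (A returns before that state can recur).
theorem isJumpingGo_eq (s : List Char) (l : List Int) :
    ∀ (hg hl : Bool), ¬(hg = true ∧ hl = true) →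
    isJumpingGo s l hg hl =
      ((hg || l.any (fun i => decide (0 < pvDigit (PySem.List.pyGetD s (i + 1) ' ') - pvDigit (PySem.List.pyGetD s i ' ')))) &&
       (hl || l.any (fun i => decide (pvDigit (PySem.List.pyGetD s (i + 1) ' ') - pvDigit (PySem.List.pyGetD s i ' ') < 0)))) := by
  induction l with
  | nil =>
    intro hg hl h
    cases hg <;> cases hl <;> simp_all [isJumpingGo]
  | cons idx rest ih =>
    intro hg hl h
    simp only [isJumpingGo, List.any_cons]
    set ri := pvDigit (PySem.List.pyGetD s (idx + 1) ' ') - pvDigit (PySem.List.pyGetD s idx ' ') with hri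
    cases hg <;> cases hl <;>
      cases h1 : decide (0 < ri) <;> cases h2 : decide (ri < 0) <;>
      simp_all

-- A's "any over range(len-1)" is an existence over adjacent Nat positions.
theorem anyRange_iff (s : List Char) (P : Int → Bool) :
    ((PySem.List.pyRange 0 ((s.length : Int) - 1) 1).any
      (fun i => P (pvDigit (PySem.List.pyGetD s (i + 1) ' ') - pvDigit (PySem.List.pyGetD s i ' ')))) = true
    ↔ ∃ (k : Nat) (_ : k + 1 < s.length), P (pvDigit s[k + 1] - pvDigit s[k]) = true := by
  simp only [List.any_eq_true, PySem.List.mem_pyRange_one]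
  constructor
  · rintro ⟨i, ⟨h0, h1⟩, hp⟩
    obtain ⟨k, rfl⟩ : ∃ k : Nat, i = (k : Int) := ⟨i.toNat, by omega⟩
    refine ⟨k, by omega, ?_⟩
    rw [show (k : Int) + 1 = ((k + 1 : Nat) : Int) from by push_cast; ring] at hp
    simp only [PySem.List.pyGetD_natCast] at hp
    rw [List.getD_eq_getElem s ' ' (by omega : k < s.length),
        List.getD_eq_getElem s ' ' (by omega : k + 1 < s.length)] at hp
    exact hp
  · rintro ⟨k, hk, hp⟩
    refine ⟨(k : Int), ⟨by omega, by omega⟩, ?_⟩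
    rw [show (k : Int) + 1 = ((k + 1 : Nat) : Int) from by push_cast; ring]
    simp only [PySem.List.pyGetD_natCast]
    rw [List.getD_eq_getElem s ' ' (by omega : k < s.length),
        List.getD_eq_getElem s ' ' (by omega : k + 1 < s.length)]
    exact hp

-- "ds equals its ascending sort" is adjacent monotonicity.
theorem sorted_asc_eq_self_iff (ds : List Int) :
    PySem.List.sorted ds (fun x => x) false = ds ↔
      ∀ (k : Nat) (_ : k + 1 < ds.length), ds[k] ≤ ds[k + 1] := by
  constructor
  · intro h
    have hp : ds.Pairwise (fun a b => a ≤ b) := by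
      have := PySem.List.sorted_pairwise ds (fun x => x)
      rwa [h] at this
    have hc := (List.isChain_iff_pairwise (R := fun a b : Int => a ≤ b)).mpr hp
    intro k hk
    exact (List.isChain_iff_getElem.mp hc) k hk
  · intro h
    exact PySem.List.sorted_eq_self_of_pairwise ds (fun x => x)
      ((List.isChain_iff_pairwise (R := fun a b : Int => a ≤ b)).mp
        (List.isChain_iff_getElem.mpr h))

-- "ds equals its descending sort" is adjacent antitonicity.
theorem sorted_desc_eq_self_iff (ds : List Int) :
    PySem.List.sorted ds (fun x => x) true = ds ↔
      ∀ (k : Nat) (_ : k + 1 < ds.length), ds[k + 1] ≤ ds[k] := by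
  constructor
  · intro h
    have hp : ds.Pairwise (fun a b => b ≤ a) := by
      have := PySem.List.sorted_pairwise_rev ds (fun x => x)
      rwa [h] at this
    have hc := (List.isChain_iff_pairwise (R := fun a b : Int => b ≤ a)).mpr hp
    intro k hk
    exact (List.isChain_iff_getElem.mp hc) k hk
  · intro h
    exact PySem.List.sorted_rev_eq_self_of_pairwise ds (fun x => x)
      ((List.isChain_iff_pairwise (R := fun a b : Int => b ≤ a)).mp
        (List.isChain_iff_getElem.mpr h))

-- ===== VERDICT (by name: the statement is the Claim_ definition above) =====
theorem is_jumping_spec : Claim_equal_is_jumping := by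
  intro number _ _
  unfold Spec_is_jumping is_jumping is_jumping_alt
  rw [isJumpingGo_eq _ _ false false (by simp)]
  simp only [Bool.false_or]
  set s := (PySem.Int.toStr number).toList with hs
  set ds := s.map pvDigit with hds
  have hlen : ds.length = s.length := by simp [hds]
  have hget : ∀ (k : Nat) (h : k < s.length), ds[k]'(by omega) = pvDigit s[k] := by
    intro k h; simp [hds]
  have hgt : (s.length.cast - 1 |> fun b => (PySem.List.pyRange 0 b 1)).any
      (fun i => decide (0 < pvDigit (PySem.List.pyGetD s (i + 1) ' ') - pvDigit (PySem.List.pyGetD s i ' ')))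
      = (ds != PySem.List.sorted ds (fun x => x) true) := by
    rw [Bool.eq_iff_iff, bne_iff_ne, ne_comm, ← not_iff_not, Bool.not_eq_true, not_not,
        ← Bool.not_eq_true, anyRange_iff s (fun d => decide (0 < d))]
    push Not
    rw [sorted_desc_eq_self_iff]
    constructor
    · intro h k hk
      have := h k (by omega)
      rw [hget k (by omega), hget (k+1) (by omega)]
      simp at this ⊢; omega
    · intro h k hk
      have := h k (by omega)
      rw [hget k (by omega), hget (k+1) (by omega)] at this
      simp at this ⊢; omega
  have hlt : (s.length.cast - 1 |> fun b => (PySem.List.pyRange 0 b 1)).any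
      (fun i => decide (pvDigit (PySem.List.pyGetD s (i + 1) ' ') - pvDigit (PySem.List.pyGetD s i ' ') < 0))
      = (ds != PySem.List.sorted ds (fun x => x) false) := by
    rw [Bool.eq_iff_iff, bne_iff_ne, ne_comm, ← not_iff_not, Bool.not_eq_true, not_not,
        ← Bool.not_eq_true, anyRange_iff s (fun d => decide (d < 0))]
    push Not
    rw [sorted_asc_eq_self_iff]
    constructor
    · intro h k hk
      have := h k (by omega)
      rw [hget k (by omega), hget (k+1) (by omega)]
      simp at this ⊢; omega
    · intro h k hk
      have := h k (by omega)
      rw [hget k (by omega), hget (k+1) (by omega)] at this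
      simp at this ⊢; omega
  rw [hgt, hlt, Bool.and_comm]
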